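-- pv_equiv track=rewrite | github.com/epilectrik/voynich | phases/01-09_early_hypothesis/phase23_regime_boundary_analysis.py | is_hazard_adjacent
-- ===== SOURCE A (Python) =====
-- from typing import Dict, List, Tuple, Optional, Set
--
-- HAZARD_CLASSES = {
--     'PHASE_ORDERING': {
--         'transitions': [('shey', 'aiin'), ('shey', 'al'), ('shey', 'c'),
--                         ('dy', 'aiin'), ('dy', 'chey'), ('chey', 'chedy'), ('chey', 'shedy')],
--         'keywords': {'chey', 'shey', 'dy'}
--     },
--     'COMPOSITION_JUMP': {
--         'transitions': [('chedy', 'ee'), ('c', 'ee'), ('shedy', 'aiin'), ('shedy', 'o')],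
--         'keywords': {'chedy', 'shedy', 'aiin', 'ee'}
--     },
--     'CONTAINMENT_TIMING': {
--         'transitions': [('chol', 'r'), ('l', 'chol'), ('or', 'dal'), ('he', 'or')],
--         'keywords': {'l', 'c', 'o', 'r'}
--     },
--     'ENERGY_OVERSHOOT': {
--         'transitions': [('he', 't')],
--         'keywords': {'he', 't', 'k'}
--     },
--     'RATE_MISMATCH': {
--         'transitions': [('ar', 'dal')],
--         'keywords': {'or', 'dal', 'ar', 'chol'}
--     }
-- }
--
-- FORBIDDEN_TRANSITIONS = set()
--
-- def is_hazard_adjacent(prev_token: str, curr_token: str) -> Tuple[bool, Optional[str]]: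
--     """Check if transition is hazard-adjacent or forbidden."""
--     if (prev_token, curr_token) in FORBIDDEN_TRANSITIONS:
--         # Find which hazard class
--         for hc_name, hc_data in HAZARD_CLASSES.items():
--             if (prev_token, curr_token) in hc_data['transitions']:
--                 return True, hc_name
--
--     # Check keyword adjacency
--     for hc_name, hc_data in HAZARD_CLASSES.items():
--         keywords = hc_data['keywords']
--         if prev_token in keywords or curr_token in keywords:
--             return True, hc_name
--
--     return False, None
-- ===== SOURCE B (Python) =====
-- from typing import Tuple, Optional
--
-- HAZARD_CLASSES = {
--     'PHASE_ORDERING': {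
--         'transitions': [('shey', 'aiin'), ('shey', 'al'), ('shey', 'c'),
--                         ('dy', 'aiin'), ('dy', 'chey'), ('chey', 'chedy'), ('chey', 'shedy')],
--         'keywords': {'chey', 'shey', 'dy'}
--     },
--     'COMPOSITION_JUMP': {
--         'transitions': [('chedy', 'ee'), ('c', 'ee'), ('shedy', 'aiin'), ('shedy', 'o')],
--         'keywords': {'chedy', 'shedy', 'aiin', 'ee'}
--     },
--     'CONTAINMENT_TIMING': {
--         'transitions': [('chol', 'r'), ('l', 'chol'), ('or', 'dal'), ('he', 'or')],
--         'keywords': {'l', 'c', 'o', 'r'}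
--     },
--     'ENERGY_OVERSHOOT': {
--         'transitions': [('he', 't')],
--         'keywords': {'he', 't', 'k'}
--     },
--     'RATE_MISMATCH': {
--         'transitions': [('ar', 'dal')],
--         'keywords': {'or', 'dal', 'ar', 'chol'}
--     }
-- }
--
-- # Index built once: keyword -> (rank of earliest class listing it, class name).
-- KEYWORD_INDEX = {}
-- for _rank, (_name, _data) in enumerate(HAZARD_CLASSES.items()):
--     for _kw in _data['keywords']:
--         if _kw not in KEYWORD_INDEX:
--             KEYWORD_INDEX[_kw] = (_rank, _name)
--
--
-- def is_hazard_adjacent(prev_token: str, curr_token: str) -> Tuple[bool, Optional[str]]: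
--     """Check if transition is hazard-adjacent (index lookup, no per-call scan)."""
--     p = KEYWORD_INDEX.get(prev_token)
--     c = KEYWORD_INDEX.get(curr_token)
--     if p is None and c is None:
--         return False, None
--     if c is None or (p is not None and p[0] <= c[0]):
--         return True, p[1]
--     return True, c[1]
-- ===== Notes on version B (the rewrite author's own statement) =====
-- stated objective: simpler
-- what changed: Replaces the per-call linear scan over HAZARD_CLASSES (and the dead FORBIDDEN_TRANSITIONS block) with a module-level keyword->(rank,class) index built once; the call does two dict lookups and picks the class with the smaller rank, preserving A's first-match priority.
import Mathlib
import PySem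

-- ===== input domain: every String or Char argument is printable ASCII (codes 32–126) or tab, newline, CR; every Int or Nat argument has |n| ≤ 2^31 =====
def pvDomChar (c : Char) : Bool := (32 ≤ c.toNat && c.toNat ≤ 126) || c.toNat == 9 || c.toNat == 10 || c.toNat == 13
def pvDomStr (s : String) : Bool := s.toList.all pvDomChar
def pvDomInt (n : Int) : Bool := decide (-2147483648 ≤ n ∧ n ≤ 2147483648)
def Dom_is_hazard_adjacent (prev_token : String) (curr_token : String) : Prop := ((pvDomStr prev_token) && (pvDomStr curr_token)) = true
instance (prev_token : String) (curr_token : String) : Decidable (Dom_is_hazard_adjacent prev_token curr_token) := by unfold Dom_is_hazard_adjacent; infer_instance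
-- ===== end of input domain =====

-- B replaces A's per-call linear scan over HAZARD_CLASSES (and the dead FORBIDDEN_TRANSITIONS block)
-- with a keyword -> (rank, class) index built once; the call is two lookups plus a rank comparison.

-- ===== PORT A =====
-- HAZARD_CLASSES as (name, (transitions, keywords)); set iteration order fixed as written.
def hazardClasses : List (String × List (String × String) × List String) :=
  [ ("PHASE_ORDERING",
      ([("shey","aiin"),("shey","al"),("shey","c"),("dy","aiin"),("dy","chey"),("chey","chedy"),("chey","shedy")],
       ["chey","shey","dy"])),
    ("COMPOSITION_JUMP",
      ([("chedy","ee"),("c","ee"),("shedy","aiin"),("shedy","o")],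
       ["chedy","shedy","aiin","ee"])),
    ("CONTAINMENT_TIMING",
      ([("chol","r"),("l","chol"),("or","dal"),("he","or")],
       ["l","c","o","r"])),
    ("ENERGY_OVERSHOOT",
      ([("he","t")],
       ["he","t","k"])),
    ("RATE_MISMATCH",
      ([("ar","dal")],
       ["or","dal","ar","chol"])) ]

def forbiddenTransitions : PySem.Set (String × String) := []

-- the inner 'for' inside the FORBIDDEN_TRANSITIONS branch (may fall through)
def loopTransA (cls : List (String × List (String × String) × List String))
    (p c : String) : Option (Bool × Option String) :=
  match cls with
  | [] => none
  | (n, ts, _) :: rest => if ts.contains (p, c) then some (true, some n) else loopTransA rest p c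

-- the keyword-adjacency 'for' loop
def loopKwA (cls : List (String × List (String × String) × List String))
    (p c : String) : Bool × Option String :=
  match cls with
  | [] => (false, none)
  | (n, _, kws) :: rest =>
      if kws.contains p || kws.contains c then (true, some n) else loopKwA rest p c

def is_hazard_adjacent (prev_token : String) (curr_token : String) : Bool × Option String :=
  match (if forbiddenTransitions.contains (prev_token, curr_token) then
           loopTransA hazardClasses prev_token curr_token
         else none) with
  | some r => r
  | none => loopKwA hazardClasses prev_token curr_token

-- ===== PORT B =====
def hazardClassesB : List (String × List String) :=
  [ ("PHASE_ORDERING", ["chey","shey","dy"]),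
    ("COMPOSITION_JUMP", ["chedy","shedy","aiin","ee"]),
    ("CONTAINMENT_TIMING", ["l","c","o","r"]),
    ("ENERGY_OVERSHOOT", ["he","t","k"]),
    ("RATE_MISMATCH", ["or","dal","ar","chol"]) ]

-- KEYWORD_INDEX: built once by the module-level loop (first occurrence per keyword wins)
def buildIndex (rank : Int) (cls : List (String × List String))
    (d : PySem.Dict String (Int × String)) : PySem.Dict String (Int × String) :=
  match cls with
  | [] => d
  | (name, kws) :: rest =>
      buildIndex (rank + 1) rest
        (kws.foldl (fun d kw => if d.contains kw then d else d.insert kw (rank, name)) d)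

def keywordIndex : PySem.Dict String (Int × String) := buildIndex 0 hazardClassesB PySem.Dict.empty

def is_hazard_adjacent_alt (prev_token : String) (curr_token : String) : Bool × Option String :=
  match keywordIndex.get? prev_token, keywordIndex.get? curr_token with
  | none, none => (false, none)
  | some p, none => (true, some p.2)
  | none, some c => (true, some c.2)
  | some p, some c => if p.1 ≤ c.1 then (true, some p.2) else (true, some c.2)

-- ===== PRECONDITION & SPEC =====
def Spec_is_hazard_adjacent (prev_token : String) (curr_token : String) (out : Bool × Option String) : Prop := out = is_hazard_adjacent_alt prev_token curr_token
instance (prev_token : String) (curr_token : String) (out : Bool × Option String) : Decidable (Spec_is_hazard_adjacent prev_token curr_token out) := by unfold Spec_is_hazard_adjacent; infer_instance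

-- ===== CLAIM (what is proved, stated in full; the proofs are below) =====
def Claim_equal_is_hazard_adjacent : Prop := ∀ (prev_token : String) (curr_token : String), Dom_is_hazard_adjacent prev_token curr_token → Spec_is_hazard_adjacent prev_token curr_token (is_hazard_adjacent prev_token curr_token)

-- ===== LEMMAS AND PROOFS =====

-- the index lookup, characterised class by class (earliest class listing the token wins)
set_option maxHeartbeats 1000000 in
lemma get?_keywordIndex (t : String) :
    keywordIndex.get? t =
      if t = "chey" ∨ t = "shey" ∨ t = "dy" then some (0, "PHASE_ORDERING")
      else if t = "chedy" ∨ t = "shedy" ∨ t = "aiin" ∨ t = "ee" then some (1, "COMPOSITION_JUMP")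
      else if t = "l" ∨ t = "c" ∨ t = "o" ∨ t = "r" then some (2, "CONTAINMENT_TIMING")
      else if t = "he" ∨ t = "t" ∨ t = "k" then some (3, "ENERGY_OVERSHOOT")
      else if t = "or" ∨ t = "dal" ∨ t = "ar" ∨ t = "chol" then some (4, "RATE_MISMATCH")
      else none := by
  have h : keywordIndex = PySem.Dict.mk
      [("chey",(0,"PHASE_ORDERING")),("shey",(0,"PHASE_ORDERING")),("dy",(0,"PHASE_ORDERING")),
       ("chedy",(1,"COMPOSITION_JUMP")),("shedy",(1,"COMPOSITION_JUMP")),("aiin",(1,"COMPOSITION_JUMP")),("ee",(1,"COMPOSITION_JUMP")),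
       ("l",(2,"CONTAINMENT_TIMING")),("c",(2,"CONTAINMENT_TIMING")),("o",(2,"CONTAINMENT_TIMING")),("r",(2,"CONTAINMENT_TIMING")),
       ("he",(3,"ENERGY_OVERSHOOT")),("t",(3,"ENERGY_OVERSHOOT")),("k",(3,"ENERGY_OVERSHOOT")),
       ("or",(4,"RATE_MISMATCH")),("dal",(4,"RATE_MISMATCH")),("ar",(4,"RATE_MISMATCH")),("chol",(4,"RATE_MISMATCH"))] := by decide
  rw [h]
  by_cases h0 : t = "chey"
  · subst h0; decide
  by_cases h1 : t = "shey"
  · subst h1; decide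
  by_cases h2 : t = "dy"
  · subst h2; decide
  by_cases h3 : t = "chedy"
  · subst h3; decide
  by_cases h4 : t = "shedy"
  · subst h4; decide
  by_cases h5 : t = "aiin"
  · subst h5; decide
  by_cases h6 : t = "ee"
  · subst h6; decide
  by_cases h7 : t = "l"
  · subst h7; decide
  by_cases h8 : t = "c"
  · subst h8; decide
  by_cases h9 : t = "o"
  · subst h9; decide
  by_cases h10 : t = "r"
  · subst h10; decide
  by_cases h11 : t = "he"
  · subst h11; decide
  by_cases h12 : t = "t"
  · subst h12; decide
  by_cases h13 : t = "k"
  · subst h13; decide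
  by_cases h14 : t = "or"
  · subst h14; decide
  by_cases h15 : t = "dal"
  · subst h15; decide
  by_cases h16 : t = "ar"
  · subst h16; decide
  by_cases h17 : t = "chol"
  · subst h17; decide
  have g0 : ("chey" == t) = false := by simp; exact fun h => h0 h.symm
  have g1 : ("shey" == t) = false := by simp; exact fun h => h1 h.symm
  have g2 : ("dy" == t) = false := by simp; exact fun h => h2 h.symm
  have g3 : ("chedy" == t) = false := by simp; exact fun h => h3 h.symm
  have g4 : ("shedy" == t) = false := by simp; exact fun h => h4 h.symm
  have g5 : ("aiin" == t) = false := by simp; exact fun h => h5 h.symm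
  have g6 : ("ee" == t) = false := by simp; exact fun h => h6 h.symm
  have g7 : ("l" == t) = false := by simp; exact fun h => h7 h.symm
  have g8 : ("c" == t) = false := by simp; exact fun h => h8 h.symm
  have g9 : ("o" == t) = false := by simp; exact fun h => h9 h.symm
  have g10 : ("r" == t) = false := by simp; exact fun h => h10 h.symm
  have g11 : ("he" == t) = false := by simp; exact fun h => h11 h.symm
  have g12 : ("t" == t) = false := by simp; exact fun h => h12 h.symm
  have g13 : ("k" == t) = false := by simp; exact fun h => h13 h.symm
  have g14 : ("or" == t) = false := by simp; exact fun h => h14 h.symm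
  have g15 : ("dal" == t) = false := by simp; exact fun h => h15 h.symm
  have g16 : ("ar" == t) = false := by simp; exact fun h => h16 h.symm
  have g17 : ("chol" == t) = false := by simp; exact fun h => h17 h.symm
  simp [PySem.Dict.get?, g0, g1, g2, g3, g4, g5, g6, g7, g8, g9, g10, g11, g12, g13, g14, g15, g16, g17, h0, h1, h2, h3, h4, h5, h6, h7, h8, h9, h10, h11, h12, h13, h14, h15, h16, h17]

-- ===== VERDICT (by name: the statement is the Claim_ definition above) =====
set_option maxHeartbeats 1000000 in
theorem is_hazard_adjacent_spec : Claim_equal_is_hazard_adjacent := by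
  intro p c _
  show is_hazard_adjacent p c = is_hazard_adjacent_alt p c
  unfold is_hazard_adjacent is_hazard_adjacent_alt forbiddenTransitions
  rw [get?_keywordIndex p, get?_keywordIndex c]
  split_ifs <;> simp_all [loopKwA, hazardClasses, PySem.Set.contains]
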